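-- pv_equiv track=rewrite | github.com/iamvickynguyen/Kattis-Solutions | secret_chamber.py | dfs
-- ===== SOURCE A (Python) =====
-- def dfs(graph, node, visited):
--     if node not in visited:
--         visited.append(node)
--         if node not in graph:
--             return visited
--         for n in graph[node]:
--             dfs(graph, n, visited)
--     return visited
-- ===== SOURCE B (Python) =====
-- def dfs(graph, node, visited):
--     stack = [node]
--     while stack:
--         cur = stack.pop()
--         if cur in visited:
--             continue
--         visited.append(cur)
--         stack.extend(reversed(graph.get(cur, [])))
--     return visited
-- ===== Notes on version B (the rewrite author's own statement) =====
-- stated objective: alternative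
-- what changed: The recursive DFS is replaced by an iterative DFS with an explicit stack (neighbors pushed in reverse so pop order matches the recursion), with the visited check moved to pop time.
import Mathlib
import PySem

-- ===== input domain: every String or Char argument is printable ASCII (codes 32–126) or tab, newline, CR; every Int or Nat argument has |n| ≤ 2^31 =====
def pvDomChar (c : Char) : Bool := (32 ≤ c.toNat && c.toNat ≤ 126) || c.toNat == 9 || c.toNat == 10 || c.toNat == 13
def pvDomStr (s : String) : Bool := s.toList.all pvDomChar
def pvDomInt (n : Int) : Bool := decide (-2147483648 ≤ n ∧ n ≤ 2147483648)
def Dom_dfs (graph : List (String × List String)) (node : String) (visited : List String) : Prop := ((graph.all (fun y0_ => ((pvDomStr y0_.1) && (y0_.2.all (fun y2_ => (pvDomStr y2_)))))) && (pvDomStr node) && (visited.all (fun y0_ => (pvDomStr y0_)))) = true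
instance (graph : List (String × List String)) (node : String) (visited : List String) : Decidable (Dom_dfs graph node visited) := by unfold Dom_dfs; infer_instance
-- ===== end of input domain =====

-- B replaces the recursive DFS by an iterative DFS with an explicit stack (same visit order,
-- same cost); both Python functions also mutate `visited` in place identically, the proof is
-- about the returned value.

-- ===== PORT A =====
-- number of dict keys not yet visited: the termination measure used by both ports
def pvMu (graph : List (String × List String)) (visited : List String) : Nat :=
  (graph.map Prod.fst).countP (fun k => !(visited.contains k))

-- fueled transliteration of A's recursion; the fuel is only a totality guard: `dfs` below
-- supplies `pvMu graph visited + 1`, which is proved sufficient (dfsFuel_fuel_eq below)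
def dfsFuel (fuel : Nat) (graph : List (String × List String)) (node : String) (visited : List String) : List String :=
  match fuel with
  | 0 => visited
  | f + 1 =>
    if visited.contains node then visited
    else
      let v := visited ++ [node]
      match List.lookup node graph with
      | none => v
      | some ns => ns.foldl (fun acc n => dfsFuel f graph n acc) v

def dfs (graph : List (String × List String)) (node : String) (visited : List String) : List String :=
  dfsFuel (pvMu graph visited + 1) graph node visited

-- ===== PORT B =====
-- termination lemmas for the stack loop (the loop itself cites them)
lemma pvMu_append_le (graph : List (String × List String)) (visited : List String) (x : String) :
    pvMu graph (visited ++ [x]) ≤ pvMu graph visited := by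
  apply List.countP_mono_left
  intro k _ hk
  simp only [List.contains_append, Bool.not_or, Bool.and_eq_true, Bool.not_eq_eq_eq_not] at hk ⊢
  exact hk.1

lemma countP_lt_of_witness {α : Type} (p q : α → Bool) (l : List α)
    (hpq : ∀ a ∈ l, p a = true → q a = true) (x : α) (hx : x ∈ l)
    (hpx : p x = false) (hqx : q x = true) : l.countP p < l.countP q := by
  induction l with
  | nil => cases hx
  | cons a t ih =>
    rw [List.countP_cons, List.countP_cons]
    rcases List.mem_cons.mp hx with rfl | hxt
    · have hle : t.countP p ≤ t.countP q :=
        List.countP_mono_left (fun b hb => hpq b (List.mem_cons_of_mem _ hb))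
      rw [hpx, hqx]; simp; omega
    · have hlt : t.countP p < t.countP q := ih (fun b hb => hpq b (List.mem_cons_of_mem _ hb)) hxt
      have hha : p a = true → q a = true := hpq a (List.mem_cons_self ..)
      rcases hpa : p a with _ | _ <;> rcases hqa : q a with _ | _ <;> simp_all <;> omega

lemma lookup_some_mem {ns : List String} {graph : List (String × List String)} {x : String}
    (h : List.lookup x graph = some ns) : x ∈ graph.map Prod.fst := by
  induction graph with
  | nil => simp [List.lookup] at h
  | cons p t ih =>
    rw [List.lookup] at h
    by_cases hx : x == p.1
    · simp at hx; simp [hx]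
    · simp [hx] at h; simp [ih h]

lemma pvMu_append_lt {graph : List (String × List String)} {visited : List String} {x : String}
    {ns : List String} (hl : List.lookup x graph = some ns) (hx : visited.contains x = false) :
    pvMu graph (visited ++ [x]) < pvMu graph visited := by
  refine countP_lt_of_witness _ _ _ ?_ x (lookup_some_mem hl) ?_ ?_
  · intro a _ ha
    simp only [List.contains_append, Bool.not_or, Bool.and_eq_true, Bool.not_eq_eq_eq_not] at ha ⊢
    exact ha.1
  · simp
  · simpa using hx

-- the stack is modelled with its top at the HEAD of the list, so Python's
-- `stack.extend(reversed(graph.get(cur, [])))` + pop-from-end is prepending the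
-- neighbour list (`.getD []` = `.get(cur, [])`) and popping from the front
def dfsLoop (graph : List (String × List String)) (stack visited : List String) : List String :=
  match stack with
  | [] => visited
  | node :: rest =>
    if visited.contains node then dfsLoop graph rest visited
    else dfsLoop graph ((List.lookup node graph).getD [] ++ rest) (visited ++ [node])
termination_by (pvMu graph visited, stack.length)
decreasing_by
  · exact Prod.Lex.right _ (by simp only [List.length_cons]; omega)
  · rename_i hcont
    rcases hl : List.lookup node graph with _ | ns
    · rcases lt_or_eq_of_le (pvMu_append_le graph visited node) with h | h
      · exact Prod.Lex.left _ _ h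
      · rw [h]; exact Prod.Lex.right _ (by simp only [Option.getD_none, List.nil_append, List.length_cons]; omega)
    · exact Prod.Lex.left _ _ (pvMu_append_lt hl (by simpa using hcont))

def dfs_alt (graph : List (String × List String)) (node : String) (visited : List String) : List String :=
  dfsLoop graph [node] visited

-- ===== PRECONDITION & SPEC =====
def Spec_dfs (graph : List (String × List String)) (node : String) (visited : List String) (out : List String) : Prop := out = dfs_alt graph node visited
instance (graph : List (String × List String)) (node : String) (visited : List String) (out : List String) : Decidable (Spec_dfs graph node visited out) := by unfold Spec_dfs; infer_instance

-- ===== CLAIM (what is proved, stated in full; the proofs are below) =====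
def Claim_equal_dfs : Prop := ∀ (graph : List (String × List String)) (node : String) (visited : List String), Dom_dfs graph node visited → Spec_dfs graph node visited (dfs graph node visited)

-- ===== LEMMAS AND PROOFS =====

lemma mem_foldl_of_mem {α β : Type} (step : List α → β → List α) (x : α)
    (h : ∀ acc b, x ∈ acc → x ∈ step acc b) :
    ∀ (l : List β) (acc : List α), x ∈ acc → x ∈ l.foldl step acc := by
  intro l
  induction l with
  | nil => intro acc hx; simpa using hx
  | cons b t ih => intro acc hx; exact ih _ (h acc b hx)

lemma mem_dfsFuel (f : Nat) (graph : List (String × List String)) (node : String)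
    (visited : List String) (x : String) (hx : x ∈ visited) :
    x ∈ dfsFuel f graph node visited := by
  induction f generalizing node visited with
  | zero => simpa [dfsFuel] using hx
  | succ f ih =>
    rw [dfsFuel]
    split
    · exact hx
    · rcases hlookup : List.lookup node graph with _ | ns <;> simp only [hlookup]
      · simp [hx]
      · exact mem_foldl_of_mem _ x (fun acc n hm => ih n acc hm) ns _ (by simp [hx])

lemma pvMu_mono {graph : List (String × List String)} {v w : List String}
    (h : ∀ x ∈ v, x ∈ w) : pvMu graph w ≤ pvMu graph v := by
  apply List.countP_mono_left
  intro k _ hk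
  simp only [Bool.not_eq_eq_eq_not, Bool.not_true, List.contains_eq_mem, decide_eq_false_iff_not] at hk ⊢
  exact fun hmem => hk (h k hmem)

lemma pvMu_dfsFuel_le (f : Nat) (graph : List (String × List String)) (node : String)
    (visited : List String) : pvMu graph (dfsFuel f graph node visited) ≤ pvMu graph visited :=
  pvMu_mono (fun x hx => mem_dfsFuel f graph node visited x hx)

lemma dfsFuel_fuel_eq (f : Nat) : ∀ (f' : Nat) (graph : List (String × List String))
    (node : String) (visited : List String), pvMu graph visited < f → pvMu graph visited < f' →
    dfsFuel f graph node visited = dfsFuel f' graph node visited := by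
  induction f with
  | zero => intro f' g node v h _; omega
  | succ f ih =>
    intro f' g node v h h'
    match f' with
    | 0 => omega
    | f'' + 1 =>
      rw [dfsFuel, dfsFuel]
      split
      · rfl
      · rename_i hcont
        rcases hl : List.lookup node g with _ | ns <;> simp only [hl]
        have hlt : pvMu g (v ++ [node]) < pvMu g v :=
          pvMu_append_lt hl (by simpa using hcont)
        have hgoal : ∀ (ns' : List String) (acc : List String),
            pvMu g acc < f → pvMu g acc < f'' →
            ns'.foldl (fun acc n => dfsFuel f g n acc) acc
              = ns'.foldl (fun acc n => dfsFuel f'' g n acc) acc := by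
          intro ns'
          induction ns' with
          | nil => intro acc _ _; rfl
          | cons n t iht =>
            intro acc ha ha'
            simp only [List.foldl_cons]
            rw [ih f'' g n acc ha ha']
            have hle : pvMu g (dfsFuel f'' g n acc) ≤ pvMu g acc := pvMu_dfsFuel_le _ _ _ _
            exact iht _ (by omega) (by omega)
        exact hgoal ns _ (by omega) (by omega)

lemma foldl_dfsFuel_canon (graph : List (String × List String)) (F : Nat) :
    ∀ (ns : List String) (acc : List String), pvMu graph acc < F →
    ns.foldl (fun acc n => dfsFuel F graph n acc) acc
      = ns.foldl (fun acc n => dfsFuel (pvMu graph acc + 1) graph n acc) acc := by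
  intro ns
  induction ns with
  | nil => intro acc _; rfl
  | cons n t ih =>
    intro acc ha
    simp only [List.foldl_cons]
    rw [dfsFuel_fuel_eq F (pvMu graph acc + 1) graph n acc ha (by omega)]
    have hle : pvMu graph (dfsFuel (pvMu graph acc + 1) graph n acc) ≤ pvMu graph acc :=
      pvMu_dfsFuel_le _ _ _ _
    exact ih _ (by omega)

lemma dfsLoop_eq_foldl (graph : List (String × List String)) :
    ∀ (stack visited : List String),
    dfsLoop graph stack visited
      = stack.foldl (fun acc n => dfsFuel (pvMu graph acc + 1) graph n acc) visited := by
  intro stack visited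
  induction stack, visited using dfsLoop.induct graph with
  | case1 visited => rw [dfsLoop, List.foldl_nil]
  | case2 visited node rest hcont ih =>
    have hv : dfsFuel (pvMu graph visited + 1) graph node visited = visited := by
      rw [dfsFuel, if_pos hcont]
    rw [dfsLoop, if_pos hcont, ih, List.foldl_cons, hv]
  | case3 visited node rest hcont ih =>
    rw [dfsLoop, if_neg hcont, ih, List.foldl_cons]
    rcases hl : List.lookup node graph with _ | ns
    · have hv : dfsFuel (pvMu graph visited + 1) graph node visited = visited ++ [node] := by
        rw [dfsFuel, if_neg hcont]; simp only [hl]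
      rw [hv]
      simp only [Option.getD_none, List.nil_append]
    · have hlt : pvMu graph (visited ++ [node]) < pvMu graph visited :=
        pvMu_append_lt hl (by simpa using hcont)
      have hv : dfsFuel (pvMu graph visited + 1) graph node visited
          = ns.foldl (fun acc n => dfsFuel (pvMu graph acc + 1) graph n acc) (visited ++ [node]) := by
        rw [dfsFuel, if_neg hcont]; simp only [hl]
        exact foldl_dfsFuel_canon graph (pvMu graph visited) ns (visited ++ [node]) hlt
      rw [hv]
      simp only [Option.getD_some, List.foldl_append]

-- ===== VERDICT (by name: the statement is the Claim_ definition above) =====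
theorem dfs_spec : Claim_equal_dfs := by
  intro graph node visited _
  unfold Spec_dfs dfs dfs_alt
  rw [dfsLoop_eq_foldl]
  simp only [List.foldl_cons, List.foldl_nil]
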